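-- pv_equiv track=rewrite | github.com/sanantoha/algos | arrays/best_seats.py | bestSeat
-- ===== SOURCE A (Python) =====
-- def bestSeat(seats):
--
--     bestSeatIdx = -1
--     left = 0
--     maxSpace = 0
--
--     while left < len(seats):
--         right = left + 1
--         while right < len(seats) and seats[right] == 0:
--             right += 1
--
--         availableSeats = right - left - 1
--         if availableSeats > maxSpace:
--             maxSpace = availableSeats
--             bestSeatIdx = (left + right) // 2
--         left = right
--
--     return bestSeatIdx
-- ===== SOURCE B (Python) =====
-- def bestSeat(seats):
--     n = len(seats)
--     boundaries = [0] + [i for i in range(1, n) if seats[i] != 0] + [n]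
--     bestSeatIdx = -1
--     maxSpace = 0
--     for a, b in zip(boundaries, boundaries[1:]):
--         space = b - a - 1
--         if space > maxSpace:
--             maxSpace = space
--             bestSeatIdx = (a + b) // 2
--     return bestSeatIdx
-- ===== Notes on version B (the rewrite author's own statement) =====
-- stated objective: simpler
-- what changed: Replaces the nested while loops with a precomputed boundary list ([0] + occupied indices + [n]) and a single pairwise zip pass over consecutive boundaries.
import Mathlib
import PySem

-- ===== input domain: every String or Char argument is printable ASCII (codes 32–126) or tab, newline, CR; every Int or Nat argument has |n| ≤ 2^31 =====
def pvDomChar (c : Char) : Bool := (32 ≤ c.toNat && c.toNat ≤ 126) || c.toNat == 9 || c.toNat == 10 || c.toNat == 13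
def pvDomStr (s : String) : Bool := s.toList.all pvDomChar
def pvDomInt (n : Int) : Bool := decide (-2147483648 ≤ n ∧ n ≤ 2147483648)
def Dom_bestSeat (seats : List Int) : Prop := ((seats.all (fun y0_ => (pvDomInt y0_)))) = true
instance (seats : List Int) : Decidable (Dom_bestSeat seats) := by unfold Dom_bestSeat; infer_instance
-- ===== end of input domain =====

-- B replaces A's nested while loops by a precomputed boundary list plus one pairwise pass (simpler decomposition, same O(n) cost).


-- ===== PORT A =====
-- inner while: 'while right < len(seats) and seats[right] == 0: right += 1'
-- (fuel-based structural recursion; fuel = seats.length + 1 is proved sufficient below)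
def pvScanA (seats : List Int) (fuel : Nat) (r : Int) : Int :=
  match fuel with
  | 0 => r
  | f + 1 =>
    if r < (seats.length : Int) ∧ PySem.List.pyGet? seats r = some 0 then
      pvScanA seats f (r + 1)
    else r

-- outer while loop of A, state (left, bestSeatIdx, maxSpace)
def pvLoopA (seats : List Int) (fuel : Nat) (left best maxSpace : Int) : Int :=
  match fuel with
  | 0 => best
  | f + 1 =>
    if left < (seats.length : Int) then
      let right := pvScanA seats (seats.length + 1) (left + 1)
      let availableSeats := right - left - 1
      if availableSeats > maxSpace then
        pvLoopA seats f right (PySem.Int.floordiv (left + right) 2) availableSeats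
      else
        pvLoopA seats f right best maxSpace
    else best

def bestSeat (seats : List Int) : Int :=
  pvLoopA seats (seats.length + 1) 0 (-1) 0

-- ===== PORT B =====
def bestSeat_alt (seats : List Int) : Int :=
  let n : Int := seats.length
  let boundaries : List Int :=
    (0 :: (PySem.List.pyRange 1 n 1).filter (fun i => !(PySem.List.pyGet? seats i == some 0))) ++ [n]
  let step := fun (st : Int × Int) (p : Int × Int) =>
    let space := p.2 - p.1 - 1
    if space > st.2 then (PySem.Int.floordiv (p.1 + p.2) 2, space) else st
  ((boundaries.zip boundaries.tail).foldl step (-1, 0)).1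

-- ===== PRECONDITION & SPEC =====
def Spec_bestSeat (seats : List Int) (out : Int) : Prop := out = bestSeat_alt seats
instance (seats : List Int) (out : Int) : Decidable (Spec_bestSeat seats out) := by unfold Spec_bestSeat; infer_instance

-- ===== CLAIM (what is proved, stated in full; the proofs are below) =====
def Claim_equal_bestSeat : Prop := ∀ (seats : List Int), Dom_bestSeat seats → Spec_bestSeat seats (bestSeat seats)

-- ===== LEMMAS AND PROOFS =====

theorem pvScanA_ge (seats : List Int) (fuel : Nat) (r : Int) : r ≤ pvScanA seats fuel r := by
  induction fuel generalizing r with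
  | zero => simp [pvScanA]
  | succ f ih =>
    rw [pvScanA]
    split
    · have := ih (r + 1); omega
    · omega

theorem pvScanA_le (seats : List Int) (fuel : Nat) (r : Int) (h : r ≤ (seats.length : Int)) :
    pvScanA seats fuel r ≤ (seats.length : Int) := by
  induction fuel generalizing r with
  | zero => simpa [pvScanA]
  | succ f ih =>
    rw [pvScanA]
    split
    · next hc => exact ih (r + 1) (by omega)
    · exact h

-- B's filtered tail boundaries, starting after index l
def pvOnes (seats : List Int) (l : Int) : List Int :=
  (PySem.List.pyRange (l + 1) (seats.length : Int) 1).filter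
    (fun i => !(PySem.List.pyGet? seats i == some 0))

theorem pvOnes_eq (seats : List Int) (fuel : Nat) (r : Int)
    (hr : r ≤ (seats.length : Int))
    (hf : ((seats.length : Int) - r).toNat ≤ fuel) :
    (PySem.List.pyRange r (seats.length : Int) 1).filter
        (fun i => !(PySem.List.pyGet? seats i == some 0)) =
      (if pvScanA seats fuel r < (seats.length : Int)
       then pvScanA seats fuel r :: pvOnes seats (pvScanA seats fuel r)
       else []) := by
  induction fuel generalizing r with
  | zero =>
    have hrl : r = (seats.length : Int) := by omega
    simp [pvScanA, hrl]
  | succ f ih =>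
    rw [pvScanA]
    split
    · next hc =>
      rw [PySem.List.pyRange_one_cons hc.1, List.filter_cons_of_neg (by simp [hc.2])]
      exact ih (r + 1) (by omega) (by omega)
    · next hc =>
      by_cases hlt : r < (seats.length : Int)
      · have hne : ¬ PySem.List.pyGet? seats r = some 0 := fun h0 => hc ⟨hlt, h0⟩
        rw [PySem.List.pyRange_one_cons hlt]
        simp only [hlt, if_pos]
        rw [List.filter_cons_of_pos (by simp [hne])]
        unfold pvOnes
        rfl
      · have : (seats.length : Int) ≤ r := by omega
        simp [PySem.List.pyRange_one_eq_nil this, hlt]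

-- the step function of B's fold
def pvStep : Int × Int → Int × Int → Int × Int := fun st p =>
  if p.2 - p.1 - 1 > st.2 then (PySem.Int.floordiv (p.1 + p.2) 2, p.2 - p.1 - 1) else st

theorem pvStep_of_le (st p : Int × Int) (h : ¬ p.2 - p.1 - 1 > st.2) : pvStep st p = st :=
  if_neg h

theorem pvStep_of_gt (st p : Int × Int) (h : p.2 - p.1 - 1 > st.2) :
    pvStep st p = (PySem.Int.floordiv (p.1 + p.2) 2, p.2 - p.1 - 1) :=
  if_pos h

theorem pvLoopA_stop (seats : List Int) (fuel : Nat) (l best mx : Int)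
    (h : ¬ l < (seats.length : Int)) : pvLoopA seats fuel l best mx = best := by
  cases fuel with
  | zero => rfl
  | succ f => rw [pvLoopA, if_neg h]

theorem pvLoopA_eq_fold (seats : List Int) (fuel : Nat) (l best mx : Int)
    (h0 : 0 ≤ l) (hl : l < (seats.length : Int))
    (hf : ((seats.length : Int) - l).toNat ≤ fuel) :
    pvLoopA seats fuel l best mx =
      (((l :: (pvOnes seats l ++ [(seats.length : Int)])).zip
         (pvOnes seats l ++ [(seats.length : Int)])).foldl pvStep (best, mx)).1 := by
  induction fuel generalizing l best mx with
  | zero => omega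
  | succ f ih =>
    rw [pvLoopA, if_pos hl]
    have hones := pvOnes_eq seats (seats.length + 1) (l + 1) (by omega) (by omega)
    set right := pvScanA seats (seats.length + 1) (l + 1) with hR
    have hge : l + 1 ≤ right := pvScanA_ge seats (seats.length + 1) (l + 1)
    have hb : right ≤ (seats.length : Int) := pvScanA_le seats (seats.length + 1) (l + 1) (by omega)
    have hones' : pvOnes seats l =
        (if right < (seats.length : Int) then right :: pvOnes seats right else []) := by
      unfold pvOnes
      rw [hones]
      rfl
    by_cases hlt : right < (seats.length : Int)
    · rw [hones']
      rw [if_pos hlt]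
      -- the tail list for the next iteration: pvOnes seats right = pvOnes seats (right - 1) minus nothing
      -- (the next loop starts its scan at right + 1, and uses pvOnes seats right)
      by_cases hgt : right - l - 1 > mx
      · rw [if_pos hgt]
        rw [ih right (PySem.Int.floordiv (l + right) 2) (right - l - 1) (by omega) hlt (by omega)]
        simp only [List.cons_append, List.zip_cons_cons, List.foldl_cons]
        rw [pvStep_of_gt (best, mx) (l, right) (by simpa using hgt)]
      · rw [if_neg hgt]
        rw [ih right best mx (by omega) hlt (by omega)]
        simp only [List.cons_append, List.zip_cons_cons, List.foldl_cons]
        rw [pvStep_of_le (best, mx) (l, right) (by simpa using hgt)]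
    · have hrl : right = (seats.length : Int) := by omega
      rw [hones', if_neg hlt]
      by_cases hgt : right - l - 1 > mx
      · rw [if_pos hgt, pvLoopA_stop seats f right _ _ (by omega)]
        simp only [List.nil_append, List.zip_cons_cons, List.zip_nil_right,
          List.foldl_cons, List.foldl_nil]
        rw [show ((seats.length : Int)) = right from hrl.symm]
        rw [pvStep_of_gt (best, mx) (l, right) (by simpa using hgt)]
      · rw [if_neg hgt, pvLoopA_stop seats f right _ _ (by omega)]
        simp only [List.nil_append, List.zip_cons_cons, List.zip_nil_right,
          List.foldl_cons, List.foldl_nil]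
        rw [show ((seats.length : Int)) = right from hrl.symm]
        rw [pvStep_of_le (best, mx) (l, right) (by simpa using hgt)]

-- ===== VERDICT (by name: the statement is the Claim_ definition above) =====
theorem bestSeat_spec : Claim_equal_bestSeat := by
  intro seats _
  unfold Spec_bestSeat bestSeat bestSeat_alt
  by_cases hn : 0 < (seats.length : Int)
  · rw [pvLoopA_eq_fold seats (seats.length + 1) 0 (-1) 0 le_rfl hn (by omega)]
    have h01 : pvOnes seats 0 =
        (PySem.List.pyRange 1 (seats.length : Int) 1).filter
          (fun i => !(PySem.List.pyGet? seats i == some 0)) := by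
      unfold pvOnes
      norm_num
    rw [h01]
    simp only [List.cons_append, List.tail_cons]
    rfl
  · have hlen : seats.length = 0 := by omega
    have : seats = [] := List.length_eq_zero_iff.mp hlen
    subst this
    decide
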